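-- pv_equiv track=rewrite | github.com/malaonda222/Python | Esercizi/ER/AltreSimulazioni/EserciziVari/14.py | analyze_even_odd
-- ===== SOURCE A (Python) =====
-- def analyze_even_odd(nums: list[int]) -> dict[str, int | None]:
--     if not nums:
--         raise ValueError("Lista vuota.")
--
--     even_min = None
--     odd_max = None
--     conteggio_even = 0
--     conteggio_odd = 0
--     for num in nums:
--         if num % 2 == 0:
--             if even_min == None or num < even_min:
--                 even_min = num
--             conteggio_even += 1
--         elif num % 2 != 0:
--             if odd_max == None or num > odd_max:
--                 odd_max = num
--             conteggio_odd += 1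
--
--     return {
--         "Numero pari più piccolo": even_min,
--         "Numero dispari più grande": odd_max,
--         "Conteggio totale numeri pari": conteggio_even,
--         "Conteggio totale numeri dispari": conteggio_odd
--     }
-- ===== SOURCE B (Python) =====
-- def analyze_even_odd(nums: list[int]) -> dict[str, int | None]:
--     if not nums:
--         raise ValueError("Lista vuota.")
--     evens = [x for x in nums if x % 2 == 0]
--     odds = [x for x in nums if x % 2 != 0]
--     return {
--         "Numero pari più piccolo": min(evens) if evens else None,
--         "Numero dispari più grande": max(odds) if odds else None,
--         "Conteggio totale numeri pari": len(evens),
--         "Conteggio totale numeri dispari": len(odds),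
--     }
-- ===== Notes on version B (the rewrite author's own statement) =====
-- stated objective: simpler
-- what changed: Replaced the single fused loop with running min/max/count accumulators by a partition into evens/odds via comprehensions followed by library min/max/len reductions.
import Mathlib
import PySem

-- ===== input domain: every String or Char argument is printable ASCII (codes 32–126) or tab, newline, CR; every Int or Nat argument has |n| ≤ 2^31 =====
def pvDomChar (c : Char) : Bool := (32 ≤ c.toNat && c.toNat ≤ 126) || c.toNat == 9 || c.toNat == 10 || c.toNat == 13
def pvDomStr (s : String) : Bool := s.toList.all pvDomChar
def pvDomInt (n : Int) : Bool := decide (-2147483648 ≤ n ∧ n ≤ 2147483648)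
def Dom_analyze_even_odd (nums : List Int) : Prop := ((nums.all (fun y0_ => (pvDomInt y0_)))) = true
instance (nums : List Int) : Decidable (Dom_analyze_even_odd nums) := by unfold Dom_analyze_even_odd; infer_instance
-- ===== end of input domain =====

-- B is simpler: it partitions into evens/odds and reduces with library min/max/len,
-- instead of A's fused loop with four running accumulators. Equivalence of return values on nonempty lists.

-- ===== PORT A =====
-- A's loop body, one step of the fused accumulation (even_min, odd_max, conteggio_even, conteggio_odd)
def aeoStep (s : Option Int × Option Int × Int × Int) (num : Int) : Option Int × Option Int × Int × Int :=
  let (em, om, ce, co) := s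
  if PySem.Int.mod num 2 == 0 then
    ((match em with | none => some num | some m => if num < m then some num else some m), om, ce + 1, co)
  else if PySem.Int.mod num 2 != 0 then
    (em, (match om with | none => some num | some m => if num > m then some num else some m), ce, co + 1)
  else s

def analyze_even_odd (nums : List Int) : List (String × Option Int) :=
  let s := nums.foldl aeoStep (none, none, 0, 0)
  [("Numero pari più piccolo", s.1),
   ("Numero dispari più grande", s.2.1),
   ("Conteggio totale numeri pari", some s.2.2.1),
   ("Conteggio totale numeri dispari", some s.2.2.2)]

-- ===== PORT B =====
def analyze_even_odd_alt (nums : List Int) : List (String × Option Int) :=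
  let evens := nums.filter (fun x => PySem.Int.mod x 2 == 0)
  let odds := nums.filter (fun x => PySem.Int.mod x 2 != 0)
  [("Numero pari più piccolo", if evens.isEmpty then none else PySem.List.min? evens (fun x => x)),
   ("Numero dispari più grande", if odds.isEmpty then none else PySem.List.max? odds (fun x => x)),
   ("Conteggio totale numeri pari", some evens.length),
   ("Conteggio totale numeri dispari", some odds.length)]

-- ===== PRECONDITION & SPEC =====
-- A raises ValueError on the empty list (and so does B); Pre_ excludes exactly that input.
def Pre_analyze_even_odd (nums : List Int) : Prop := nums ≠ []
instance (nums : List Int) : Decidable (Pre_analyze_even_odd nums) := by unfold Pre_analyze_even_odd; infer_instance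
def pvWitness_analyze_even_odd : List Int := [2, 4, 1, 3]

def Spec_analyze_even_odd (nums : List Int) (out : List (String × Option Int)) : Prop := out = analyze_even_odd_alt nums
instance (nums : List Int) (out : List (String × Option Int)) : Decidable (Spec_analyze_even_odd nums out) := by unfold Spec_analyze_even_odd; infer_instance

-- ===== CLAIM (what is proved, stated in full; the proofs are below) =====
def Claim_equal_analyze_even_odd : Prop := ∀ (nums : List Int), Dom_analyze_even_odd nums → Pre_analyze_even_odd nums → Spec_analyze_even_odd nums (analyze_even_odd nums)

-- ===== LEMMAS AND PROOFS =====

def aeoMin (a : Option Int) (x : Int) : Option Int :=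
  match a with | none => some x | some m => if x < m then some x else some m
def aeoMax (a : Option Int) (x : Int) : Option Int :=
  match a with | none => some x | some m => if x > m then some x else some m

lemma aeoMin_some (m x : Int) : aeoMin (some m) x = some (min m x) := by
  unfold aeoMin
  rcases lt_or_ge x m with h | h
  · simp [if_pos h, min_eq_right h.le]
  · simp [if_neg (not_lt.mpr h), min_eq_left h]
lemma aeoMax_some (m x : Int) : aeoMax (some m) x = some (max m x) := by
  unfold aeoMax
  rcases lt_or_ge m x with h | h
  · simp [if_pos h, max_eq_right h.le]
  · simp [if_neg (not_lt.mpr h), max_eq_left h]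

lemma foldl_aeoMin_some (l : List Int) (m : Int) :
    l.foldl aeoMin (some m) = some (l.foldl min m) := by
  induction l generalizing m with
  | nil => rfl
  | cons x t ih => simp [List.foldl, aeoMin_some, ih]

lemma foldl_aeoMax_some (l : List Int) (m : Int) :
    l.foldl aeoMax (some m) = some (l.foldl max m) := by
  induction l generalizing m with
  | nil => rfl
  | cons x t ih => simp [List.foldl, aeoMax_some, ih]

lemma aeo_fold_split (nums : List Int) (em om : Option Int) (ce co : Int) :
    nums.foldl aeoStep (em, om, ce, co) =
      ((nums.filter (fun x => PySem.Int.mod x 2 == 0)).foldl aeoMin em,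
       (nums.filter (fun x => PySem.Int.mod x 2 != 0)).foldl aeoMax om,
       ce + (nums.filter (fun x => PySem.Int.mod x 2 == 0)).length,
       co + (nums.filter (fun x => PySem.Int.mod x 2 != 0)).length) := by
  induction nums generalizing em om ce co with
  | nil => simp
  | cons x t ih =>
    have hm : ∀ y : Int, PySem.Int.mod y 2 = y % 2 := by
      intro y; simp [PySem.Int.mod, Int.fmod_eq_emod]
    rcases Int.emod_two_eq x with h | h
    · simp [List.foldl, aeoStep, List.filter_cons, hm, h, ih, aeoMin]
      omega
    · simp [List.foldl, aeoStep, List.filter_cons, hm, h, ih, aeoMax]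
      omega

lemma foldl_aeoMin_none (l : List Int) :
    l.foldl aeoMin none = (if l.isEmpty then none else PySem.List.min? l (fun x => x)) := by
  rcases l with _ | ⟨x, t⟩
  · rfl
  · simp [List.foldl, aeoMin, foldl_aeoMin_some, PySem.List.min?_id_cons]

lemma foldl_aeoMax_none (l : List Int) :
    l.foldl aeoMax none = (if l.isEmpty then none else PySem.List.max? l (fun x => x)) := by
  rcases l with _ | ⟨x, t⟩
  · rfl
  · simp [List.foldl, aeoMax, foldl_aeoMax_some, PySem.List.max?_id_cons]

theorem aeo_equiv (nums : List Int) :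
    analyze_even_odd nums = analyze_even_odd_alt nums := by
  unfold analyze_even_odd analyze_even_odd_alt
  rw [aeo_fold_split, foldl_aeoMin_none, foldl_aeoMax_none]
  norm_num

-- ===== VERDICT (by name: the statement is the Claim_ definition above) =====
theorem analyze_even_odd_spec : Claim_equal_analyze_even_odd := by
  intro nums _ _
  unfold Spec_analyze_even_odd
  exact aeo_equiv nums
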